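-- pv_equiv track=rewrite | github.com/twisted/pydoctor | pydoctor/napoleon/docstring.py | _recombine_set_tokens
-- ===== SOURCE A (Python) =====
-- import collections
-- from typing import Any, Callable, Deque, Dict, Iterator, List, Optional, Tuple, Union
--
-- def _recombine_set_tokens(tokens: List[str]) -> List[str]:
--     """
--     Merge the special literal choices tokens together.
--
--     Example
--     -------
--     >>> tokens = ["{", "1", ", ", "2", "}"]
--     >>> ann._recombine_set_tokens(tokens)
--     ... ["{1, 2}"]
--     """
--     token_queue = collections.deque(tokens)
--     keywords = ("optional", "default")
--
--     def takewhile_set(tokens: Deque[str]) -> Iterator[str]: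
--         open_obj_delim = 0
--         previous_token = None
--         while True:
--             try:
--                 token = tokens.popleft()
--             except IndexError:
--                 break
--
--             if token == ", ":
--                 previous_token = token
--                 continue
--
--             if not token.strip():
--                 continue
--
--             if token in keywords:
--                 tokens.appendleft(token)
--                 if previous_token is not None:
--                     tokens.appendleft(previous_token)
--                 break
--
--             if previous_token is not None:
--                 yield previous_token
--                 previous_token = None
--
--             if token == "{":
--                 open_obj_delim += 1
--             elif token == "}":
--                 open_obj_delim -= 1
--
--             yield token
--
--             if open_obj_delim == 0:
--                 break
--
--     def combine_set(tokens: Deque[str]) -> Iterator[str]: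
--         while True:
--             try:
--                 token = tokens.popleft()
--             except IndexError:
--                 break
--
--             if token == "{":
--                 tokens.appendleft("{")
--                 yield "".join(takewhile_set(tokens))
--             else:
--                 yield token
--
--     return list(combine_set(token_queue))
-- ===== SOURCE B (Python) =====
-- def _split_set(tokens, i):
--     """Scan forward from i (tokens[i] == '{') with a depth counter only.
--     Return (j, kw): tokens[i:j] is the raw set-literal region, kw is True when
--     the scan stopped at an unconsumed 'optional'/'default' keyword."""
--     keywords = ("optional", "default")
--     depth = 0
--     j = i
--     n = len(tokens)
--     while j < n:
--         t = tokens[j]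
--         if t == ", " or not t.strip():
--             j += 1
--             continue
--         if t in keywords:
--             return j, True
--         depth += (t == "{") - (t == "}")
--         j += 1
--         if depth == 0:
--             return j, False
--     return j, False
--
--
-- def _render(region):
--     """Render a raw region: drop whitespace-only tokens, split on ', ' tokens
--     into groups, join the nonempty groups with ', '.  Also report whether the
--     region ends in a dangling ', ' (pending separator before a keyword)."""
--     sig = [t for t in region if t.strip()]
--     groups = [[]]
--     for t in sig:
--         if t == ", ":
--             groups.append([])
--         else:
--             groups[-1].append(t)
--     text = ", ".join("".join(g) for g in groups if g)
--     return text, bool(sig) and sig[-1] == ", "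
--
--
-- def _recombine_set_tokens(tokens):
--     """Staged re-implementation: split off each brace region, then render it."""
--     out = []
--     i = 0
--     n = len(tokens)
--     while i < n:
--         t = tokens[i]
--         if t != "{":
--             out.append(t)
--             i += 1
--             continue
--         j, kw = _split_set(tokens, i)
--         text, dangling = _render(tokens[i:j])
--         out.append(text)
--         if kw and dangling:
--             out.append(", ")
--         i = j
--     return out
-- ===== Notes on version B (the rewrite author's own statement) =====
-- stated objective: simpler
-- what changed: Replaced the deque with two nested pushback generators by a staged pipeline: first split off the raw brace region with a plain depth scan, then render it separately by filtering whitespace tokens, splitting on ', ' tokens into groups and joining the nonempty groups with ', '.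
import Mathlib
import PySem

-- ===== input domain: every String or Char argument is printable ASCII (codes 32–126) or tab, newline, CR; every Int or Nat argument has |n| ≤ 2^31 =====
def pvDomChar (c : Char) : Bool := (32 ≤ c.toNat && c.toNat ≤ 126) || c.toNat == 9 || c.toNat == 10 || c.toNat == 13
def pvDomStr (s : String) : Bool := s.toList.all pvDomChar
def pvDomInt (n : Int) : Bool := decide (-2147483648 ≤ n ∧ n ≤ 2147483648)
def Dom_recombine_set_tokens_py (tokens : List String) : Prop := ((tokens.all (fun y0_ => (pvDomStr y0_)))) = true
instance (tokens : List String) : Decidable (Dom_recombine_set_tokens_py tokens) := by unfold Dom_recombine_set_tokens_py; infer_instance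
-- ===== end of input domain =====

-- B replaces A's deque with two nested pushback generators by a staged design:
-- split off the raw brace region first, then render it by filtering and group
-- splitting (objective: simpler); return values are identical.

-- ===== PORT A =====
-- takewhile_set: pops tokens, yields (first component) the merged-set pieces,
-- returns (second component) the remaining deque (with keyword/', ' pushed back).
def pyTakewhileSet : List String → Int → Option String → (List String × List String)
  | [], _, _ => ([], [])
  | t :: rest, d, prev =>
    if t = ", " then pyTakewhileSet rest d (some t)
    else if PySem.Str.strip t = "" then pyTakewhileSet rest d prev
    else if t = "optional" ∨ t = "default" then
      ([], match prev with | some p => p :: t :: rest | none => t :: rest)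
    else
      let emitted : List String := match prev with | some p => [p] | none => []
      let d' : Int := if t = "{" then d + 1 else if t = "}" then d - 1 else d
      if d' = 0 then (emitted ++ [t], rest)
      else
        let r := pyTakewhileSet rest d' none
        (emitted ++ t :: r.1, r.2)

-- remaining-deque length bound, cited by pyCombineSet's decreasing_by
theorem pyTakewhileSet_len : ∀ (l : List String) (d : Int) (p : Option String),
    (pyTakewhileSet l d p).2.length ≤ l.length + (match p with | some _ => 1 | none => 0) := by
  intro l
  induction l with
  | nil => intro d p; simp [pyTakewhileSet]
  | cons t rest ih =>
    intro d p
    by_cases h1 : t = ", "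
    · simp only [pyTakewhileSet, if_pos h1]
      have := ih d (some t); cases p <;> simp at this ⊢ <;> omega
    by_cases h2 : PySem.Str.strip t = ""
    · simp only [pyTakewhileSet, if_neg h1, if_pos h2]
      have := ih d p; cases p <;> simp at this ⊢ <;> omega
    by_cases h3 : t = "optional" ∨ t = "default"
    · simp only [pyTakewhileSet, if_neg h1, if_neg h2, if_pos h3]
      cases p <;> simp
    · simp only [pyTakewhileSet, if_neg h1, if_neg h2, if_neg h3]
      generalize (if t = "{" then d + 1 else if t = "}" then d - 1 else d) = d2
      have := ih d2 none
      by_cases h4 : d2 = 0 <;> cases p <;> simp [h4] at this ⊢ <;> omega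

-- first step of takewhile_set after the '{' pushback, cited by decreasing_by
theorem pyTakewhileSet_open (rest : List String) :
    pyTakewhileSet ("{" :: rest) 0 none =
      ("{" :: (pyTakewhileSet rest 1 none).1, (pyTakewhileSet rest 1 none).2) := by
  simp [pyTakewhileSet, show ¬ PySem.Str.strip "{" = "" from by decide]

-- combine_set on the deque
def pyCombineSet : List String → List String
  | [] => []
  | t :: rest =>
    if t = "{" then
      let r := pyTakewhileSet ("{" :: rest) 0 none
      PySem.Str.join "" r.1 :: pyCombineSet r.2
    else t :: pyCombineSet rest
termination_by l => l.length
decreasing_by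
  · rw [pyTakewhileSet_open]
    have := pyTakewhileSet_len rest 1 none
    simp at this ⊢; omega
  · simp

def recombine_set_tokens_py (tokens : List String) : List String :=
  pyCombineSet tokens

-- ===== PORT B =====
-- _split_set: walk forward with a depth counter only; return the raw region
-- (tokens[:k]), the remainder (tokens[k:]) and the stopped-at-keyword flag.
def altSplitSet : List String → Int → (List String × List String × Bool)
  | [], _ => ([], [], false)
  | t :: rest, depth =>
    if t = ", " ∨ PySem.Str.strip t = "" then
      let r := altSplitSet rest depth
      (t :: r.1, r.2.1, r.2.2)
    else if t = "optional" ∨ t = "default" then ([], t :: rest, true)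
    else
      let d : Int := depth + (if t = "{" then 1 else 0) - (if t = "}" then 1 else 0)
      if d = 0 then ([t], rest, false)
      else
        let r := altSplitSet rest d
        (t :: r.1, r.2.1, r.2.2)

-- region ++ remainder = input, cited by altMain's decreasing_by
theorem altSplitSet_append : ∀ (l : List String) (d : Int),
    (altSplitSet l d).1 ++ (altSplitSet l d).2.1 = l := by
  intro l
  induction l with
  | nil => intro d; simp [altSplitSet]
  | cons t rest ih =>
    intro d
    by_cases h1 : t = ", " ∨ PySem.Str.strip t = ""
    · simp only [altSplitSet, if_pos h1]; simpa using ih d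
    by_cases h2 : t = "optional" ∨ t = "default"
    · simp [altSplitSet, if_neg h1, if_pos h2]
    · simp only [altSplitSet, if_neg h1, if_neg h2]
      generalize (d + (if t = "{" then (1:Int) else 0) - (if t = "}" then 1 else 0)) = d2
      by_cases h4 : d2 = 0
      · simp [h4]
      · simp [h4]; simpa using ih d2

-- first step of _split_set on the opening '{', cited by decreasing_by
theorem altSplitSet_open (rest : List String) :
    altSplitSet ("{" :: rest) 0 =
      ("{" :: (altSplitSet rest 1).1, (altSplitSet rest 1).2.1, (altSplitSet rest 1).2.2) := by
  simp [altSplitSet, show ¬ PySem.Str.strip "{" = "" from by decide]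

-- groups: split the significant tokens on ', ' separators
def altGroups : List String → List (List String)
  | [] => [[]]
  | t :: rest =>
    if t = ", " then [] :: altGroups rest
    else
      match altGroups rest with
      | g :: gs => (t :: g) :: gs
      | [] => [[t]]

-- _render: filter whitespace-only tokens, join nonempty groups with ', ';
-- also report a dangling trailing ', '.
def altRender (region : List String) : String × Bool :=
  let sig := region.filter (fun t => !(PySem.Str.strip t == ""))
  let text := PySem.Str.join ", " (((altGroups sig).filter (fun g => !g.isEmpty)).map (PySem.Str.join ""))
  (text, !sig.isEmpty && (sig.getLast? == some ", "))

def altMain : List String → List String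
  | [] => []
  | t :: rest =>
    if t = "{" then
      let s := altSplitSet (t :: rest) 0
      let r := altRender s.1
      r.1 :: (if s.2.2 && r.2 then ", " :: altMain s.2.1 else altMain s.2.1)
    else t :: altMain rest
termination_by l => l.length
decreasing_by
  all_goals simp only [List.length_cons]
  all_goals try omega
  all_goals
    (have ht : t = "{" := by assumption
     subst ht
     rw [altSplitSet_open]
     have h2 := congrArg List.length (altSplitSet_append rest 1)
     simp at h2 ⊢
     omega)

def recombine_set_tokens_py_alt (tokens : List String) : List String :=
  altMain tokens

-- ===== PRECONDITION & SPEC =====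
def Spec_recombine_set_tokens_py (tokens : List String) (out : List String) : Prop := out = recombine_set_tokens_py_alt tokens
instance (tokens : List String) (out : List String) : Decidable (Spec_recombine_set_tokens_py tokens out) := by unfold Spec_recombine_set_tokens_py; infer_instance

-- ===== CLAIM (what is proved, stated in full; the proofs are below) =====
def Claim_equal_recombine_set_tokens_py : Prop := ∀ (tokens : List String), Dom_recombine_set_tokens_py tokens → Spec_recombine_set_tokens_py tokens (recombine_set_tokens_py tokens)

-- ===== LEMMAS AND PROOFS =====

-- A's yield sequence over the significant tokens of a region: a ', ' only sets
-- a pending flag, a real token flushes the pending ', ' before itself.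
def collapse : Bool → List String → List String
  | _, [] => []
  | p, t :: rest =>
    if t = ", " then collapse true rest
    else (if p then [", ", t] else [t]) ++ collapse false rest

-- the pending flag left after consuming the significant tokens
def pendAfter : Bool → List String → Bool
  | p, [] => p
  | _, t :: rest => pendAfter (t == ", ") rest

def sigOf (region : List String) : List String :=
  region.filter (fun t => !(PySem.Str.strip t == ""))

def catS (sig : List String) : String :=
  PySem.Str.join ", " (((altGroups sig).filter (fun g => !g.isEmpty)).map (PySem.Str.join ""))

-- string-level join unfoldings
theorem sj_nil (sep : String) : PySem.Str.join sep [] = "" := by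
  apply String.toList_inj.mp
  simp [PySem.Str.toList_join, PySem.Chars.join_nil]

theorem sj_cons (sep x : String) (L : List String) :
    PySem.Str.join sep (x :: L) = if L.isEmpty then x else x ++ sep ++ PySem.Str.join sep L := by
  cases L with
  | nil =>
    apply String.toList_inj.mp
    simp [PySem.Str.toList_join, PySem.Chars.join_singleton]
  | cons y L' =>
    apply String.toList_inj.mp
    simp [PySem.Str.toList_join, PySem.Chars.join_cons_cons]

theorem sj_empty_cons (x : String) (L : List String) :
    PySem.Str.join "" (x :: L) = x ++ PySem.Str.join "" L := by
  apply String.toList_inj.mp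
  cases L <;>
    simp [PySem.Str.toList_join, PySem.Chars.join_singleton, PySem.Chars.join_cons_cons,
      PySem.Chars.join_nil]

theorem altGroups_ne_nil (sig : List String) : altGroups sig ≠ [] := by
  cases sig with
  | nil => simp [altGroups]
  | cons t rest =>
    simp only [altGroups]
    split
    · simp
    · split <;> simp

theorem filter_groups_nil_iff : ∀ (sig : List String),
    ((altGroups sig).filter (fun g => !g.isEmpty)) = [] ↔ sig.any (fun t => !(t == ", ")) = false := by
  intro sig
  induction sig with
  | nil => simp [altGroups]
  | cons t rest ih =>
    by_cases h : t = ", "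
    · simpa [altGroups, h] using ih
    · cases hg : altGroups rest with
      | nil => exact absurd hg (altGroups_ne_nil rest)
      | cons g gs => simp [altGroups, h, hg]

-- all tokens ', ' → every group empty → rendered string empty
theorem catS_all_comma (sig : List String) (h : sig.any (fun t => !(t == ", ")) = false) :
    catS sig = "" := by
  unfold catS
  rw [(filter_groups_nil_iff sig).mpr h]
  simp [sj_nil]

-- prepending a real token to the significant tokens prepends it to the string
theorem catS_cons (t : String) (rest : List String) (ht : ¬ t = ", ") :
    catS (t :: rest) =
      t ++ (if (rest.head? == some ", ") && rest.any (fun u => !(u == ", "))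
            then ", " ++ catS rest else catS rest) := by
  cases rest with
  | nil => simp [catS, altGroups, sj_cons, sj_nil, ht]
  | cons u r2 =>
    by_cases hu : u = ", "
    · -- the new group [t] is closed by the following ', '
      subst hu
      have hgrp : altGroups (t :: ", " :: r2) = [t] :: altGroups r2 := by
        simp [altGroups, ht]
      have hgrp' : altGroups (", " :: r2) = [] :: altGroups r2 := by
        simp [altGroups]
      by_cases hM : ((altGroups r2).filter (fun g => !g.isEmpty)) = []
      · have hany : r2.any (fun x => !(x == ", ")) = false := (filter_groups_nil_iff r2).mp hM
        simp [catS, hgrp, hgrp', hM, sj_cons, sj_nil, hany]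
      · have hany : ¬ r2.any (fun x => !(x == ", ")) = false :=
          fun hc => hM ((filter_groups_nil_iff r2).mpr hc)
        simp only [catS, hgrp, hgrp', List.filter_cons]
        simp only [List.isEmpty_cons, Bool.not_false, if_pos]
        simp [hany, sj_cons, hM, String.append_assoc]
    · -- t joins the head group of rest
      cases hg : altGroups r2 with
      | nil => exact absurd hg (altGroups_ne_nil r2)
      | cons g gs =>
        have hgrp : altGroups (t :: u :: r2) = (t :: u :: g) :: gs := by
          simp [altGroups, hu, ht, hg]
        have hgrp' : altGroups (u :: r2) = (u :: g) :: gs := by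
          simp [altGroups, hu, hg]
        simp only [catS, hgrp, hgrp', List.filter_cons]
        simp [hu, sj_cons]
        split_ifs <;> simp_all [String.append_assoc]

-- the join of A's yields equals B's rendered string
theorem collapse_join : ∀ sig : List String,
    (PySem.Str.join "" (collapse true sig)
        = if sig.any (fun t => !(t == ", ")) then ", " ++ catS sig else "")
  ∧ (PySem.Str.join "" (collapse false sig)
        = if (sig.head? == some ", ") && sig.any (fun t => !(t == ", "))
          then ", " ++ catS sig else catS sig) := by
  intro sig
  induction sig with
  | nil => simp [collapse, sj_nil, catS, altGroups]
  | cons t rest ih =>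
    by_cases h : t = ", "
    · subst h
      have hcat : catS (", " :: rest) = catS rest := by simp [catS, altGroups]
      constructor
      · rw [show collapse true (", " :: rest) = collapse true rest by simp [collapse]]
        rw [ih.1, hcat]
        simp
      · rw [show collapse false (", " :: rest) = collapse true rest by simp [collapse]]
        rw [ih.1, hcat]
        by_cases hany : rest.any (fun u => !(u == ", ")) = true
        · simp [hany]
        · have hany' : rest.any (fun u => !(u == ", ")) = false := by
            simpa using hany
          simp [hany', catS_all_comma _ hany']
    · have hE := catS_cons t rest h
      constructor
      · rw [show collapse true (t :: rest) = ", " :: t :: collapse false rest by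
            simp [collapse, h]]
        rw [sj_empty_cons, sj_empty_cons, ih.2, hE]
        simp [h]
      · rw [show collapse false (t :: rest) = t :: collapse false rest by
            simp [collapse, h]]
        rw [sj_empty_cons, ih.2, hE]
        simp [h]

theorem pendAfter_ite : ∀ (sig : List String) (p : Bool),
    pendAfter p sig = if sig.isEmpty then p else (sig.getLast? == some ", ") := by
  intro sig
  induction sig with
  | nil => intro p; simp [pendAfter]
  | cons t rest ih =>
    intro p
    cases rest with
    | nil => simp [pendAfter]
    | cons u r2 =>
      rw [show pendAfter p (t :: u :: r2) = pendAfter (t == ", ") (u :: r2) from rfl, ih]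
      simp [List.getLast?_cons_cons]

theorem pendAfter_last (sig : List String) :
    pendAfter false sig = (!sig.isEmpty && (sig.getLast? == some ", ")) := by
  rw [pendAfter_ite]; cases sig <;> simp

-- core correspondence: A's takewhile_set = collapse/pendAfter over B's split
theorem split_spec : ∀ (l : List String) (d : Int) (p : Bool),
    pyTakewhileSet l d (if p then some ", " else none)
      = (collapse p (sigOf (altSplitSet l d).1),
         if (altSplitSet l d).2.2 && pendAfter p (sigOf (altSplitSet l d).1)
         then ", " :: (altSplitSet l d).2.1 else (altSplitSet l d).2.1) := by
  intro l
  induction l with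
  | nil => intro d p; cases p <;> simp [pyTakewhileSet, altSplitSet, sigOf, collapse, pendAfter]
  | cons t rest ih =>
    intro d p
    by_cases h1 : t = ", "
    · subst h1
      have H := ih d true
      simp only [if_pos] at H
      have hs : ¬ PySem.Str.strip ", " = "" := by decide
      cases p <;>
        simp [pyTakewhileSet, altSplitSet, sigOf, collapse, pendAfter, hs, H]
    by_cases h2 : PySem.Str.strip t = ""
    · have H := ih d p
      have hLHS : pyTakewhileSet (t :: rest) d (if p then some ", " else none)
          = pyTakewhileSet rest d (if p then some ", " else none) := by
        simp [pyTakewhileSet, h1, h2]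
      have hsplit : altSplitSet (t :: rest) d
          = (t :: (altSplitSet rest d).1, (altSplitSet rest d).2.1, (altSplitSet rest d).2.2) := by
        simp [altSplitSet, h1, h2]
      have hsig : sigOf (t :: (altSplitSet rest d).1) = sigOf (altSplitSet rest d).1 := by
        simp [sigOf, h2]
      rw [hLHS, H, hsplit, hsig]
    by_cases h3 : t = "optional" ∨ t = "default"
    · have hsplit : altSplitSet (t :: rest) d = ([], t :: rest, true) := by
        simp only [altSplitSet, if_neg (by tauto : ¬ (t = ", " ∨ PySem.Str.strip t = "")), if_pos h3]
      rw [hsplit]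
      cases p <;> simp [pyTakewhileSet, h1, h2, h3, sigOf, collapse, pendAfter]
    · -- ordinary token
      have hd : (if t = "{" then d + 1 else if t = "}" then d - 1 else d)
          = d + (if t = "{" then 1 else 0) - (if t = "}" then 1 else 0) := by
        by_cases hb : t = "{"
        · simp [hb, show ¬ ("{" : String) = "}" from by decide]
        · by_cases hc : t = "}" <;> simp [hb, hc]
      have hLHS : pyTakewhileSet (t :: rest) d (if p then some ", " else none)
          = (let emitted : List String := if p then [", "] else []
             let d' : Int := d + (if t = "{" then 1 else 0) - (if t = "}" then 1 else 0)
             if d' = 0 then (emitted ++ [t], rest)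
             else
               let r := pyTakewhileSet rest d' none
               (emitted ++ t :: r.1, r.2)) := by
        cases p <;> simp only [pyTakewhileSet, if_neg h1, if_neg h2, if_neg h3, hd] <;> simp
      have hsplit : altSplitSet (t :: rest) d
          = (let d2 : Int := d + (if t = "{" then 1 else 0) - (if t = "}" then 1 else 0)
             if d2 = 0 then ([t], rest, false)
             else
               let r := altSplitSet rest d2
               (t :: r.1, r.2.1, r.2.2)) := by
        simp only [altSplitSet, if_neg (by tauto : ¬ (t = ", " ∨ PySem.Str.strip t = "")),
          if_neg h3]
      rw [hLHS, hsplit]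
      simp only []
      generalize (d + (if t = "{" then (1:Int) else 0) - (if t = "}" then 1 else 0)) = d2
      by_cases h4 : d2 = 0
      · simp only [if_pos h4]
        cases p <;> simp [sigOf, h2, collapse, h1, pendAfter]
      · simp only [if_neg h4]
        have H := ih d2 false
        have hsig : sigOf (t :: (altSplitSet rest d2).1) = t :: sigOf (altSplitSet rest d2).1 := by
          simp [sigOf, h2]
        rw [hsig]
        have hLHS2 : pyTakewhileSet rest d2 none = pyTakewhileSet rest d2 (if false then some ", " else none) := rfl
        rw [hLHS2, H]
        cases p <;>
          simp [collapse, h1, pendAfter, show (t == ", ") = false from by simpa using h1]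

theorem loop_eq : ∀ (n : ℕ) (l : List String), l.length ≤ n → pyCombineSet l = altMain l := by
  intro n
  induction n with
  | zero =>
    intro l hl
    have : l = [] := List.eq_nil_of_length_eq_zero (Nat.le_zero.mp hl)
    subst this; simp [pyCombineSet, altMain]
  | succ n ih =>
    intro l hl
    match l with
    | [] => simp [pyCombineSet, altMain]
    | t :: rest =>
      by_cases ht : t = "{"
      · subst ht
        rw [pyCombineSet, altMain]
        simp only [reduceIte]
        -- name the split of the region
        have hsplit := split_spec ("{" :: rest) 0 false
        rw [show pyTakewhileSet ("{" :: rest) 0 none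
              = pyTakewhileSet ("{" :: rest) 0 (if false then some ", " else none) from rfl,
          hsplit]
        -- the region starts with '{'
        rw [altSplitSet_open] at *
        have hsig : sigOf ("{" :: (altSplitSet rest 1).1)
            = "{" :: sigOf (altSplitSet rest 1).1 := by
          simp [sigOf, show ¬ (PySem.Str.strip "{" == "") = true from by decide]
        -- rendered text: A's join of collapse = B's catS
        have htext : PySem.Str.join "" (collapse false (sigOf ("{" :: (altSplitSet rest 1).1)))
            = catS (sigOf ("{" :: (altSplitSet rest 1).1)) := by
          rw [(collapse_join (sigOf ("{" :: (altSplitSet rest 1).1))).2]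
          rw [hsig]
          simp [show ¬ (("{" : String) == ", ") = true from by decide]
        -- remainder is shorter
        have hlen : (altSplitSet rest 1).2.1.length ≤ rest.length := by
          have := congrArg List.length (altSplitSet_append rest 1)
          simp at this; omega
        have hrest : rest.length ≤ n := by simp at hl; omega
        -- rendered pair: text and dangling flag
        have hrend : altRender ("{" :: (altSplitSet rest 1).1)
            = (catS (sigOf ("{" :: (altSplitSet rest 1).1)),
               pendAfter false (sigOf ("{" :: (altSplitSet rest 1).1))) := by
          rw [pendAfter_last]; rfl
        rw [hrend, htext]
        by_cases hk : ((altSplitSet rest 1).2.2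
            && pendAfter false (sigOf ("{" :: (altSplitSet rest 1).1))) = true
        · rw [if_pos hk]
          rw [show ((catS (sigOf ("{" :: (altSplitSet rest 1).1)),
                pendAfter false (sigOf ("{" :: (altSplitSet rest 1).1))).2)
              = pendAfter false (sigOf ("{" :: (altSplitSet rest 1).1)) from rfl]
          rw [if_pos hk]
          have hcomma : pyCombineSet (", " :: (altSplitSet rest 1).2.1)
              = ", " :: pyCombineSet (altSplitSet rest 1).2.1 := by
            rw [pyCombineSet]; simp
          rw [hcomma, ih _ (le_trans hlen hrest)]
        · rw [if_neg hk]
          rw [show ((catS (sigOf ("{" :: (altSplitSet rest 1).1)),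
                pendAfter false (sigOf ("{" :: (altSplitSet rest 1).1))).2)
              = pendAfter false (sigOf ("{" :: (altSplitSet rest 1).1)) from rfl]
          rw [if_neg hk]
          rw [ih _ (le_trans hlen hrest)]
      · rw [pyCombineSet, altMain]
        simp only [if_neg ht]
        rw [ih rest (by simp at hl; omega)]

-- ===== VERDICT (by name: the statement is the Claim_ definition above) =====
theorem recombine_set_tokens_py_spec : Claim_equal_recombine_set_tokens_py := by
  intro tokens _
  unfold Spec_recombine_set_tokens_py recombine_set_tokens_py recombine_set_tokens_py_alt
  exact loop_eq tokens.length tokens le_rfl
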